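-- pv_equiv track=rewrite | github.com/Alexey020602/ner-x5 | ML_PART/module.py | calculate_ner_metrics
-- ===== SOURCE A (Python) =====
-- def calculate_ner_metrics(true_entities, pred_entities):
--     """
--     Calculate TP, FP, FN for each entity type (TYPE, BRAND, VOLUME, PERCENT) based on BIO tagging.
--     """
--     entity_types = ['TYPE', 'BRAND', 'VOLUME', 'PERCENT']
--     metrics = {entity: {'TP': 0, 'FP': 0, 'FN': 0} for entity in entity_types}
--
--     def group_entities(entities):
--         grouped = {entity: [] for entity in entity_types}
--         valid_entities = []
--         for start, end, label in entities:
--             if '-' in label: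
--                 prefix, entity_type = label.split('-', 1)
--                 if entity_type in entity_types:
--                     valid_entities.append((start, end, prefix, entity_type))
--
--         valid_entities.sort(key=lambda x: x[0])
--         current_entity = None
--         current_type = None
--         current_start = None
--         current_end = None
--
--         for start, end, prefix, entity_type in valid_entities:
--             if prefix == 'B':
--                 if current_entity is not None:
--                     grouped[current_type].append((current_start, current_end))
--                 current_entity = entity_type
--                 current_type = entity_type
--                 current_start = start
--                 current_end = end
--             elif prefix == 'I' and current_entity == entity_type:
--                 current_end = end
--             else:
--                 if current_entity is not None:
--                     grouped[current_type].append((current_start, current_end))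
--                 current_entity = None
--                 current_type = None
--                 current_start = None
--                 current_end = None
--
--         if current_entity is not None:
--             grouped[current_type].append((current_start, current_end))
--         return grouped
--
--     true_grouped = group_entities(true_entities)
--     pred_grouped = group_entities(pred_entities)
--
--     for entity_type in entity_types:
--         true_spans = set(true_grouped[entity_type])
--         pred_spans = set(pred_grouped[entity_type])
--         metrics[entity_type]['TP'] = len(true_spans & pred_spans)
--         metrics[entity_type]['FP'] = len(pred_spans - true_spans)
--         metrics[entity_type]['FN'] = len(true_spans - pred_spans)
--
--     return metrics
-- ===== SOURCE B (Python) =====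
-- def calculate_ner_metrics(true_entities, pred_entities):
--     """Same TP/FP/FN metrics, but without any stateful merge pass: after sorting,
--     a right-to-left pass propagates each element's 'chain end' (the end of the
--     maximal following run of I-tags of its own type), and the merged spans are
--     then just a stateless selection of the B-tagged elements with their chain
--     ends."""
--     entity_types = ['TYPE', 'BRAND', 'VOLUME', 'PERCENT']
--
--     def group_spans(entities):
--         valid = sorted(
--             [(s, e) + tuple(lab.split('-', 1))
--              for s, e, lab in entities
--              if '-' in lab and lab.split('-', 1)[1] in entity_types],
--             key=lambda x: x[0])
--         # right-to-left chain-end propagation: an element inherits the chain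
--         # end of its right neighbour when that neighbour is an I of its type
--         chain = []
--         for s, e, p, t in reversed(valid):
--             if chain and chain[0][2] == 'I' and chain[0][3] == t:
--                 e = chain[0][1]
--             chain = [(s, e, p, t)] + chain
--         # merged spans = B-tagged heads with their chain ends
--         return [(t, (s, e)) for s, e, p, t in chain if p == 'B']
--
--     true_spans = group_spans(true_entities)
--     pred_spans = group_spans(pred_entities)
--
--     result = {}
--     for et in entity_types:
--         ts = {sp for t, sp in true_spans if t == et}
--         ps = {sp for t, sp in pred_spans if t == et}
--         result[et] = {'TP': len(ts & ps), 'FP': len(ps - ts), 'FN': len(ts - ps)}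
--     return result
-- ===== Notes on version B (the rewrite author's own statement) =====
-- stated objective: alternative
-- what changed: A's single left-to-right stateful merge (current_entity/current_type/current_start/current_end scalars with a trailing flush) is replaced by two stateless stages: a right-to-left pass that propagates each element's chain end (inheriting the right neighbour's chain end when that neighbour is an I-tag of the same type), followed by a flat selection of the B-tagged heads paired with their chain ends; the per-type metrics dict is built by comprehension instead of mutating a pre-initialised nested dict.
import Mathlib
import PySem

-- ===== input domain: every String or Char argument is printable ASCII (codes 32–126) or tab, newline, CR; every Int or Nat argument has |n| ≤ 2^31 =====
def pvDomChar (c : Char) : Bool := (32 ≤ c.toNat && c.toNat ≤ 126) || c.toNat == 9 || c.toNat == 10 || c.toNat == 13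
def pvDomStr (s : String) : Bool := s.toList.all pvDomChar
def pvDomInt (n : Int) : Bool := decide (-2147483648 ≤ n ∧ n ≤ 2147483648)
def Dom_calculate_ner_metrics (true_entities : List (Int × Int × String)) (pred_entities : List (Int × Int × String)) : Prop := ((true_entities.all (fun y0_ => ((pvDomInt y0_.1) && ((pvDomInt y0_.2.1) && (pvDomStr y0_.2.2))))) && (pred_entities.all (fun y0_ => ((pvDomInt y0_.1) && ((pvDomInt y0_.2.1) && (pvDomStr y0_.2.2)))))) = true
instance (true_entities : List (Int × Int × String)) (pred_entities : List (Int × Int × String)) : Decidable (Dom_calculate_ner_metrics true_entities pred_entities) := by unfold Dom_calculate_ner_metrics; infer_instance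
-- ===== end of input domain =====

-- B replaces A's left-to-right stateful merge (current_* scalars + trailing flush) by two
-- stateless stages: a right-to-left chain-end propagation pass followed by a flat selection
-- of the B-tagged heads; objective: alternative (same behaviour, different decomposition).

-- entity_types = ['TYPE', 'BRAND', 'VOLUME', 'PERCENT']  (shared literal constant)
def pvEntityTypes : List String := ["TYPE", "BRAND", "VOLUME", "PERCENT"]

-- ===== PORT A =====

-- A's valid_entities loop: for ... if '-' in label: prefix, t = label.split('-',1); if t in entity_types: append
def pvValidA (entities : List (Int × Int × String)) : List (Int × Int × String × String) :=
  entities.foldl (fun acc x =>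
    if PySem.Str.isIn "-" x.2.2 then
      match PySem.Str.splitMax? x.2.2 "-" 1 with
      | some [p, t] => if pvEntityTypes.contains t then acc ++ [(x.1, x.2.1, p, t)] else acc
      | _ => acc   -- unreachable: split('-',1) with '-' present yields exactly two parts
    else acc) []

-- the loop body of A's state machine; state = (grouped, current) where
-- current = some (current_entity, current_type, current_start, current_end) or none
def pvStepA (st : PySem.Dict String (List (Int × Int)) × Option (String × String × Int × Int))
    (x : Int × Int × String × String) :
    PySem.Dict String (List (Int × Int)) × Option (String × String × Int × Int) :=
  let (d, cur) := st
  let (s, e, p, t) := x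
  if p == "B" then
    (match cur with
     | some (_, ct, cs, ce) => d.modify ct [] (fun l => l ++ [(cs, ce)])
     | none => d,
     some (t, t, s, e))
  else if p == "I" && (match cur with | some (ent, _, _, _) => ent == t | none => false) then
    (match cur with
     | some (ent, ct, cs, _) => (d, some (ent, ct, cs, e))
     | none => (d, none))
  else
    (match cur with
     | some (_, ct, cs, ce) => d.modify ct [] (fun l => l ++ [(cs, ce)])
     | none => d,
     none)

def pvGroupA (entities : List (Int × Int × String)) : PySem.Dict String (List (Int × Int)) :=
  let grouped := pvEntityTypes.foldl (fun d t => d.insert t []) PySem.Dict.empty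
  let valid := PySem.List.sorted (pvValidA entities) (fun x => x.1) false
  let st := valid.foldl pvStepA (grouped, none)
  match st.2 with
  | some (_, ct, cs, ce) => st.1.modify ct [] (fun l => l ++ [(cs, ce)])
  | none => st.1

def calculate_ner_metrics (true_entities : List (Int × Int × String)) (pred_entities : List (Int × Int × String)) : List (String × List (String × Int)) :=
  let metrics := pvEntityTypes.foldl
    (fun d t => d.insert t (PySem.Dict.ofList [("TP", (0 : Int)), ("FP", 0), ("FN", 0)]))
    PySem.Dict.empty
  let true_grouped := pvGroupA true_entities
  let pred_grouped := pvGroupA pred_entities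
  let metrics := pvEntityTypes.foldl (fun m et =>
    let ts : PySem.Set (Int × Int) := PySem.Set.ofList (true_grouped.getD et [])
    let ps : PySem.Set (Int × Int) := PySem.Set.ofList (pred_grouped.getD et [])
    let m := m.modify et PySem.Dict.empty (fun inner => inner.insert "TP" (PySem.Set.len (PySem.Set.inter ts ps)))
    let m := m.modify et PySem.Dict.empty (fun inner => inner.insert "FP" (PySem.Set.len (PySem.Set.diff ps ts)))
    m.modify et PySem.Dict.empty (fun inner => inner.insert "FN" (PySem.Set.len (PySem.Set.diff ts ps)))) metrics
  metrics.items.map (fun q => (q.1, q.2.items))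

-- ===== PORT B =====

-- B's comprehension-style filter
def pvValidB (entities : List (Int × Int × String)) : List (Int × Int × String × String) :=
  entities.filterMap (fun x =>
    if PySem.Str.isIn "-" x.2.2 then
      match PySem.Str.splitMax? x.2.2 "-" 1 with
      | some [p, t] => if pvEntityTypes.contains t then some (x.1, x.2.1, p, t) else none
      | _ => none
    else none)

-- one step of B's right-to-left pass: 'chain' is the already-processed suffix; the new
-- element inherits the chain end of its right neighbour when that neighbour is an I of its type
def pvChainStep (chain : List (Int × Int × String × String)) (x : Int × Int × String × String) :
    List (Int × Int × String × String) :=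
  let (s, e, p, t) := x
  let e' := match chain with
    | (_, e2, p2, t2) :: _ => if p2 == "I" && t2 == t then e2 else e
    | [] => e
  (s, e', p, t) :: chain

-- for s, e, p, t in reversed(valid): ... chain = [(s, e, p, t)] + chain
def pvChainB (valid : List (Int × Int × String × String)) : List (Int × Int × String × String) :=
  valid.reverse.foldl pvChainStep []

-- [(t, (s, e)) for s, e, p, t in chain if p == 'B']
def pvHeadB (x : Int × Int × String × String) : Option (String × Int × Int) :=
  if x.2.2.1 == "B" then some (x.2.2.2, x.1, x.2.1) else none

def calculate_ner_metrics_alt (true_entities : List (Int × Int × String)) (pred_entities : List (Int × Int × String)) : List (String × List (String × Int)) :=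
  let true_spans := (pvChainB (PySem.List.sorted (pvValidB true_entities) (fun x => x.1) false)).filterMap pvHeadB
  let pred_spans := (pvChainB (PySem.List.sorted (pvValidB pred_entities) (fun x => x.1) false)).filterMap pvHeadB
  pvEntityTypes.map (fun et =>
    let ts : PySem.Set (Int × Int) := PySem.Set.ofList ((true_spans.filter (fun r => r.1 == et)).map (fun r => r.2))
    let ps : PySem.Set (Int × Int) := PySem.Set.ofList ((pred_spans.filter (fun r => r.1 == et)).map (fun r => r.2))
    (et, [("TP", PySem.Set.len (PySem.Set.inter ts ps)),
          ("FP", PySem.Set.len (PySem.Set.diff ps ts)),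
          ("FN", PySem.Set.len (PySem.Set.diff ts ps))]))

-- ===== PRECONDITION & SPEC =====
def Spec_calculate_ner_metrics (true_entities : List (Int × Int × String)) (pred_entities : List (Int × Int × String)) (out : List (String × List (String × Int))) : Prop := out = calculate_ner_metrics_alt true_entities pred_entities
instance (true_entities : List (Int × Int × String)) (pred_entities : List (Int × Int × String)) (out : List (String × List (String × Int))) : Decidable (Spec_calculate_ner_metrics true_entities pred_entities out) := by unfold Spec_calculate_ner_metrics; infer_instance

-- ===== CLAIM (what is proved, stated in full; the proofs are below) =====
def Claim_equal_calculate_ner_metrics : Prop := ∀ (true_entities : List (Int × Int × String)) (pred_entities : List (Int × Int × String)), Dom_calculate_ner_metrics true_entities pred_entities → Spec_calculate_ner_metrics true_entities pred_entities (calculate_ner_metrics true_entities pred_entities)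

-- ===== LEMMAS AND PROOFS =====

-- proof-only helper: the run-consuming segmentation, the common ground between A's state
-- machine and B's chain-end pass (neither port computes with it)
def pvExtendB (t : String) (e : Int) : List (Int × Int × String × String) → Int × List (Int × Int × String × String)
  | [] => (e, [])
  | (s', e', p', t') :: rest =>
    if p' == "I" && t' == t then pvExtendB t e' rest else (e, (s', e', p', t') :: rest)

theorem pvExtendB_len (t : String) (e : Int) (l : List (Int × Int × String × String)) :
    (pvExtendB t e l).2.length ≤ l.length := by
  induction l generalizing e with
  | nil => simp [pvExtendB]
  | cons x rest ih =>
    obtain ⟨s', e', p', t'⟩ := x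
    simp only [pvExtendB]
    split
    · exact le_trans (ih e') (by simp)
    · simp

def pvSegmentB : List (Int × Int × String × String) → List (String × Int × Int)
  | [] => []
  | (s, e, p, t) :: rest =>
    if p == "B" then
      (t, s, (pvExtendB t e rest).1) :: pvSegmentB (pvExtendB t e rest).2
    else pvSegmentB rest
termination_by l => l.length
decreasing_by
  · exact Nat.lt_succ_of_le (pvExtendB_len t e rest)
  · simp

-- the sequence of (current_type, current_start, current_end) triples A's state machine
-- appends, in order, when run over xs from state cur (including the trailing flush)
def pvEmits : List (Int × Int × String × String) → Option (String × String × Int × Int) → List (String × Int × Int)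
  | [], none => []
  | [], some (_, ct, cs, ce) => [(ct, cs, ce)]
  | (s, e, p, t) :: rest, cur =>
    if p == "B" then
      (match cur with | some (_, ct, cs, ce) => [(ct, cs, ce)] | none => []) ++ pvEmits rest (some (t, t, s, e))
    else if p == "I" && (match cur with | some (ent, _, _, _) => ent == t | none => false) then
      (match cur with
       | some (ent, ct, cs, _) => pvEmits rest (some (ent, ct, cs, e))
       | none => pvEmits rest none)
    else
      (match cur with | some (_, ct, cs, ce) => [(ct, cs, ce)] | none => []) ++ pvEmits rest none

-- the state machine's fold plus trailing flush, as one function of (d, cur)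
def pvRunA (xs : List (Int × Int × String × String))
    (st : PySem.Dict String (List (Int × Int)) × Option (String × String × Int × Int)) :
    PySem.Dict String (List (Int × Int)) :=
  let st' := xs.foldl pvStepA st
  match st'.2 with
  | some (_, ct, cs, ce) => st'.1.modify ct [] (fun l => l ++ [(cs, ce)])
  | none => st'.1

-- B's per-element filter, named so the fold/filterMap bridge below can speak about it
def pvFB (x : Int × Int × String) : Option (Int × Int × String × String) :=
  if PySem.Str.isIn "-" x.2.2 then
    match PySem.Str.splitMax? x.2.2 "-" 1 with
    | some [p, t] => if pvEntityTypes.contains t then some (x.1, x.2.1, p, t) else none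
    | _ => none
  else none

theorem pvValidA_eq (entities : List (Int × Int × String)) : pvValidA entities = pvValidB entities := by
  have hbody : ∀ (acc : List (Int × Int × String × String)) (x : Int × Int × String),
      (if PySem.Str.isIn "-" x.2.2 then
        match PySem.Str.splitMax? x.2.2 "-" 1 with
        | some [p, t] => if pvEntityTypes.contains t then acc ++ [(x.1, x.2.1, p, t)] else acc
        | _ => acc
      else acc) = acc ++ (pvFB x).toList := by
    intro acc x
    unfold pvFB
    by_cases hin : PySem.Str.isIn "-" x.2.2 = true
    · rw [if_pos hin, if_pos hin]
      rcases hsp : PySem.Str.splitMax? x.2.2 "-" 1 with _ | ls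
      · simp
      · rcases ls with _ | ⟨p, _ | ⟨t, _ | ⟨u, more⟩⟩⟩
        · simp
        · simp
        · by_cases hct : t ∈ pvEntityTypes
          · simp [hct]
          · simp [hct]
        · simp
    · rw [if_neg hin, if_neg hin]; simp
  have hfold : ∀ (l : List (Int × Int × String)) (acc : List (Int × Int × String × String)),
      l.foldl (fun acc x =>
        if PySem.Str.isIn "-" x.2.2 then
          match PySem.Str.splitMax? x.2.2 "-" 1 with
          | some [p, t] => if pvEntityTypes.contains t then acc ++ [(x.1, x.2.1, p, t)] else acc
          | _ => acc
        else acc) acc = acc ++ l.filterMap pvFB := by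
    intro l
    induction l with
    | nil => intro acc; simp
    | cons x rest ih =>
      intro acc
      simp only [List.foldl_cons, List.filterMap_cons]
      rw [hbody acc x]
      cases h : pvFB x with
      | none => simp only [Option.toList_none, List.append_nil, ih]
      | some b => simp only [Option.toList_some, ih, List.append_assoc, List.singleton_append]
  have hvb : pvValidB entities = entities.filterMap pvFB := rfl
  rw [hvb]
  exact (hfold entities []).trans (by simp)

theorem pv_seg_aux : ∀ (n : Nat) (xs : List (Int × Int × String × String)), xs.length ≤ n →
    (pvEmits xs none = pvSegmentB xs ∧
     ∀ (t : String) (s e : Int), pvEmits xs (some (t, t, s, e)) =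
       (t, s, (pvExtendB t e xs).1) :: pvSegmentB (pvExtendB t e xs).2) := by
  intro n
  induction n with
  | zero =>
    intro xs h
    have hnil : xs = [] := List.length_eq_zero_iff.mp (Nat.le_zero.mp h)
    subst hnil
    exact ⟨by simp [pvEmits, pvSegmentB], fun t s e => by simp [pvEmits, pvSegmentB, pvExtendB]⟩
  | succ n ih =>
    intro xs h
    match xs with
    | [] => exact ⟨by simp [pvEmits, pvSegmentB], fun t s e => by simp [pvEmits, pvSegmentB, pvExtendB]⟩
    | (s', e', p', t') :: rest =>
      have hr : rest.length ≤ n := by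
        have := h; simp only [List.length_cons] at this; omega
      have iha := (ih rest hr).1
      have ihb := (ih rest hr).2
      constructor
      · by_cases hB : p' = "B"
        · subst hB
          have h1 : pvEmits ((s', e', "B", t') :: rest) none
              = pvEmits rest (some (t', t', s', e')) := by simp [pvEmits]
          rw [h1, ihb t' s' e']
          simp [pvSegmentB]
        · have hB' : (p' == "B") = false := by simpa using hB
          have h1 : pvEmits ((s', e', p', t') :: rest) none = pvEmits rest none := by
            simp [pvEmits, hB']
          rw [h1, iha]
          simp [pvSegmentB, hB']
      · intro t s e
        by_cases hB : p' = "B"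
        · subst hB
          have h1 : pvEmits ((s', e', "B", t') :: rest) (some (t, t, s, e))
              = (t, s, e) :: pvEmits rest (some (t', t', s', e')) := by simp [pvEmits]
          have h2 : pvExtendB t e ((s', e', "B", t') :: rest) = (e, (s', e', "B", t') :: rest) := by
            simp [pvExtendB]
          rw [h1, h2, ihb t' s' e']
          simp [pvSegmentB]
        · by_cases hI : p' = "I" ∧ t' = t
          · obtain ⟨hI1, hI2⟩ := hI
            subst hI1; subst hI2
            have h1 : pvEmits ((s', e', "I", t') :: rest) (some (t', t', s, e))
                = pvEmits rest (some (t', t', s, e')) := by simp [pvEmits]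
            have h2 : pvExtendB t' e ((s', e', "I", t') :: rest) = pvExtendB t' e' rest := by
              simp [pvExtendB]
            rw [h1, h2, ihb t' s e']
          · have hB' : (p' == "B") = false := by simpa using hB
            have hIc : (p' == "I" && (t == t')) = false := by
              rcases Decidable.not_and_iff_or_not.mp hI with h1 | h1
              · simp [h1]
              · by_cases hp : p' = "I"
                · have ht : ¬ (t = t') := fun hh => h1 hh.symm
                  simp [hp, ht]
                · simp [hp]
            have hIc' : (p' == "I" && (t' == t)) = false := by
              rcases Decidable.not_and_iff_or_not.mp hI with h1 | h1
              · simp [h1]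
              · by_cases hp : p' = "I"
                · simp [hp, h1]
                · simp [hp]
            have h1 : pvEmits ((s', e', p', t') :: rest) (some (t, t, s, e))
                = (t, s, e) :: pvEmits rest none := by
              simp [pvEmits, hB', hIc]
            have h2 : pvExtendB t e ((s', e', p', t') :: rest) = (e, (s', e', p', t') :: rest) := by
              simp [pvExtendB, hIc']
            rw [h1, h2, iha]
            simp [pvSegmentB, hB']

theorem pvEmits_eq_segment (xs : List (Int × Int × String × String)) :
    pvEmits xs none = pvSegmentB xs :=
  (pv_seg_aux xs.length xs le_rfl).1

-- ===== bridge from B's chain-end pass to the segmentation =====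

theorem pvChainB_cons (x : Int × Int × String × String) (rest : List (Int × Int × String × String)) :
    pvChainB (x :: rest) = pvChainStep (pvChainB rest) x := by
  simp [pvChainB, List.foldl_reverse]

-- the head of the chain pass carries exactly the run end pvExtendB computes
theorem pvChainB_head : ∀ (rest : List (Int × Int × String × String)) (s e : Int) (p t : String),
    pvChainB ((s, e, p, t) :: rest) = (s, (pvExtendB t e rest).1, p, t) :: pvChainB rest := by
  intro rest
  induction rest with
  | nil => intro s e p t; simp [pvChainStep, pvChainB, pvExtendB]
  | cons y r2 ih =>
    obtain ⟨s', e', p', t'⟩ := y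
    intro s e p t
    rw [pvChainB_cons]
    rw [ih s' e' p' t']
    by_cases hc : p' = "I" ∧ t' = t
    · obtain ⟨h1, h2⟩ := hc; subst h1; subst h2
      simp [pvChainStep, pvExtendB]
    · have hcb : (p' == "I" && (t' == t)) = false := by
        rcases Decidable.not_and_iff_or_not.mp hc with h1 | h1
        · simp [h1]
        · by_cases hp : p' = "I"
          · simp [hp, h1]
          · simp [hp]
      simp only [pvChainStep, pvExtendB, hcb]
      simp

theorem pvSpans_cons (s e : Int) (p t : String) (rest : List (Int × Int × String × String)) :
    (pvChainB ((s, e, p, t) :: rest)).filterMap pvHeadB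
      = (if p == "B" then [(t, s, (pvExtendB t e rest).1)] else [])
        ++ (pvChainB rest).filterMap pvHeadB := by
  rw [pvChainB_head]
  by_cases hB : p = "B"
  · subst hB; simp [pvHeadB]
  · have hB' : (p == "B") = false := by simpa using hB
    simp [pvHeadB, hB]

-- skipping the consumed I-run does not change the selected spans (I-tags are never heads)
theorem pvSpans_extend : ∀ (rest : List (Int × Int × String × String)) (t : String) (e : Int),
    (pvChainB (pvExtendB t e rest).2).filterMap pvHeadB = (pvChainB rest).filterMap pvHeadB := by
  intro rest
  induction rest with
  | nil => intro t e; simp [pvExtendB]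
  | cons y r2 ih =>
    obtain ⟨s', e', p', t'⟩ := y
    intro t e
    by_cases hc : p' = "I" ∧ t' = t
    · obtain ⟨h1, h2⟩ := hc; subst h1; subst h2
      have h2' : pvExtendB t' e ((s', e', "I", t') :: r2) = pvExtendB t' e' r2 := by
        simp [pvExtendB]
      rw [h2', ih t' e', pvSpans_cons]
      simp
    · have hcb : (p' == "I" && (t' == t)) = false := by
        rcases Decidable.not_and_iff_or_not.mp hc with h1 | h1
        · simp [h1]
        · by_cases hp : p' = "I"
          · simp [hp, h1]
          · simp [hp]
      simp [pvExtendB, hcb]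

theorem pvSpans_eq_segment_aux : ∀ (n : Nat) (xs : List (Int × Int × String × String)),
    xs.length ≤ n → (pvChainB xs).filterMap pvHeadB = pvSegmentB xs := by
  intro n
  induction n with
  | zero =>
    intro xs h
    have hnil : xs = [] := List.length_eq_zero_iff.mp (Nat.le_zero.mp h)
    subst hnil; simp [pvChainB, pvSegmentB]
  | succ n ih =>
    intro xs h
    match xs with
    | [] => simp [pvChainB, pvSegmentB]
    | (s, e, p, t) :: rest =>
      have hr : rest.length ≤ n := by
        have := h; simp only [List.length_cons] at this; omega
      rw [pvSpans_cons]
      by_cases hB : p = "B"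
      · subst hB
        have hext : (pvExtendB t e rest).2.length ≤ n :=
          le_trans (pvExtendB_len t e rest) hr
        rw [← pvSpans_extend rest t e, ih _ hext]
        simp [pvSegmentB]
      · have hB' : (p == "B") = false := by simpa using hB
        rw [show pvSegmentB ((s, e, p, t) :: rest) = pvSegmentB rest by simp [pvSegmentB, hB']]
        simp only [hB']
        exact ih rest hr

theorem pvSpans_eq_segment (xs : List (Int × Int × String × String)) :
    (pvChainB xs).filterMap pvHeadB = pvSegmentB xs :=
  pvSpans_eq_segment_aux xs.length xs le_rfl

theorem pvRunA_getD (xs : List (Int × Int × String × String))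
    (d : PySem.Dict String (List (Int × Int))) (cur : Option (String × String × Int × Int)) (c : String) :
    (pvRunA xs (d, cur)).getD c [] =
      d.getD c [] ++ ((pvEmits xs cur).filter (fun r => r.1 == c)).map (fun r => r.2) := by
  have hmod : ∀ (d : PySem.Dict String (List (Int × Int))) (ct : String) (cs ce : Int),
      (d.modify ct [] (fun l => l ++ [(cs, ce)])).getD c []
        = d.getD c [] ++ (List.filter (fun r => r.1 == c) [(ct, cs, ce)]).map
            (fun r : String × Int × Int => r.2) := by
    intro d ct cs ce
    rw [PySem.Dict.getD_modify]
    by_cases hc : c = ct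
    · subst hc; simp
    · simp [hc, Ne.symm hc]
  have hsplit : ∀ (a : String × Int × Int) (l : List (String × Int × Int)),
      (List.filter (fun r => r.1 == c) [a]).map (fun r : String × Int × Int => r.2) ++
        (List.filter (fun r => r.1 == c) l).map (fun r => r.2)
      = (List.filter (fun r => r.1 == c) (a :: l)).map (fun r => r.2) := by
    intro a l
    rw [← List.map_append, ← List.filter_append, List.singleton_append]
  induction xs generalizing d cur with
  | nil =>
    cases cur with
    | none => simp [pvRunA, pvEmits]
    | some q =>
      obtain ⟨ent, ct, cs, ce⟩ := q
      have h1 : pvRunA [] (d, some (ent, ct, cs, ce))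
          = d.modify ct [] (fun l => l ++ [(cs, ce)]) := by simp [pvRunA]
      rw [h1, hmod]
      simp [pvEmits]
  | cons x rest ih =>
    obtain ⟨s, e, p, t⟩ := x
    have hrun : pvRunA ((s, e, p, t) :: rest) (d, cur)
        = pvRunA rest (pvStepA (d, cur) (s, e, p, t)) := by
      simp [pvRunA]
    rw [hrun]
    cases cur with
    | none =>
      by_cases hB : p = "B"
      · subst hB
        have hs1 : pvStepA (d, none) (s, e, "B", t) = (d, some (t, t, s, e)) := by
          simp [pvStepA]
        have he1 : pvEmits ((s, e, "B", t) :: rest) none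
            = pvEmits rest (some (t, t, s, e)) := by simp [pvEmits]
        rw [hs1, ih, he1]
      · have hB' : (p == "B") = false := by simpa using hB
        have hs1 : pvStepA (d, none) (s, e, p, t) = (d, none) := by
          simp [pvStepA, hB']
        have he1 : pvEmits ((s, e, p, t) :: rest) none = pvEmits rest none := by
          simp [pvEmits, hB']
        rw [hs1, ih, he1]
    | some q =>
      obtain ⟨ent, ct, cs, ce⟩ := q
      by_cases hB : p = "B"
      · subst hB
        have hs1 : pvStepA (d, some (ent, ct, cs, ce)) (s, e, "B", t)
            = (d.modify ct [] (fun l => l ++ [(cs, ce)]), some (t, t, s, e)) := by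
          simp [pvStepA]
        have he1 : pvEmits ((s, e, "B", t) :: rest) (some (ent, ct, cs, ce))
            = (ct, cs, ce) :: pvEmits rest (some (t, t, s, e)) := by simp [pvEmits]
        rw [hs1, ih, hmod, he1]
        simp only [List.append_assoc, hsplit]
      · have hB' : (p == "B") = false := by simpa using hB
        by_cases hPI : p = "I" ∧ ent = t
        · obtain ⟨hp, hent⟩ := hPI
          subst hp; subst hent
          have hs1 : pvStepA (d, some (ent, ct, cs, ce)) (s, e, "I", ent)
              = (d, some (ent, ct, cs, e)) := by simp [pvStepA]
          have he1 : pvEmits ((s, e, "I", ent) :: rest) (some (ent, ct, cs, ce))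
              = pvEmits rest (some (ent, ct, cs, e)) := by simp [pvEmits]
          rw [hs1, ih, he1]
        · have hcond : (p == "I" && (ent == t)) = false := by
            rcases Decidable.not_and_iff_or_not.mp hPI with h1 | h1
            · simp [h1]
            · by_cases hp : p = "I"
              · simp [hp, h1]
              · simp [hp]
          have hs1 : pvStepA (d, some (ent, ct, cs, ce)) (s, e, p, t)
              = (d.modify ct [] (fun l => l ++ [(cs, ce)]), none) := by
            simp [pvStepA, hB', hcond]
          have he1 : pvEmits ((s, e, p, t) :: rest) (some (ent, ct, cs, ce))
              = (ct, cs, ce) :: pvEmits rest none := by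
            simp [pvEmits, hB', hcond]
          rw [hs1, ih, hmod, he1]
          simp only [List.append_assoc, hsplit]

theorem pvGroupA_getD (entities : List (Int × Int × String)) (c : String) (hc : c ∈ pvEntityTypes) :
    (pvGroupA entities).getD c [] =
      (((pvChainB (PySem.List.sorted (pvValidB entities) (fun x => x.1) false)).filterMap pvHeadB).filter
        (fun r => r.1 == c)).map (fun r => r.2) := by
  have hdef : pvGroupA entities =
      pvRunA (PySem.List.sorted (pvValidA entities) (fun x => x.1) false)
        (pvEntityTypes.foldl (fun d t => d.insert t []) PySem.Dict.empty, none) := rfl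
  rw [hdef, pvRunA_getD, pvEmits_eq_segment, pvValidA_eq, ← pvSpans_eq_segment]
  have hzero : (pvEntityTypes.foldl (fun d t => d.insert t ([] : List (Int × Int))) PySem.Dict.empty).getD c [] = [] := by
    simp only [pvEntityTypes, List.mem_cons] at hc
    rcases hc with rfl | rfl | rfl | rfl | h
    · rfl
    · rfl
    · rfl
    · rfl
    · cases h
  rw [hzero, List.nil_append]

theorem pv_assemble (tpT fpT fnT tpB fpB fnB tpV fpV fnV tpP fpP fnP : Int) :
    List.map (fun q : String × PySem.Dict String Int => (q.1, q.2.items))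
      (((((((((((((((((PySem.Dict.empty.insert "TYPE" (PySem.Dict.ofList [("TP", (0:Int)), ("FP", 0), ("FN", 0)])).insert
            "BRAND" (PySem.Dict.ofList [("TP", 0), ("FP", 0), ("FN", 0)])).insert
            "VOLUME" (PySem.Dict.ofList [("TP", 0), ("FP", 0), ("FN", 0)])).insert
            "PERCENT" (PySem.Dict.ofList [("TP", 0), ("FP", 0), ("FN", 0)])).modify
          "TYPE" PySem.Dict.empty fun inner => inner.insert "TP" tpT).modify
          "TYPE" PySem.Dict.empty fun inner => inner.insert "FP" fpT).modify
          "TYPE" PySem.Dict.empty fun inner => inner.insert "FN" fnT).modify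
          "BRAND" PySem.Dict.empty fun inner => inner.insert "TP" tpB).modify
          "BRAND" PySem.Dict.empty fun inner => inner.insert "FP" fpB).modify
          "BRAND" PySem.Dict.empty fun inner => inner.insert "FN" fnB).modify
          "VOLUME" PySem.Dict.empty fun inner => inner.insert "TP" tpV).modify
          "VOLUME" PySem.Dict.empty fun inner => inner.insert "FP" fpV).modify
          "VOLUME" PySem.Dict.empty fun inner => inner.insert "FN" fnV).modify
          "PERCENT" PySem.Dict.empty fun inner => inner.insert "TP" tpP).modify
          "PERCENT" PySem.Dict.empty fun inner => inner.insert "FP" fpP).modify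
          "PERCENT" PySem.Dict.empty fun inner => inner.insert "FN" fnP).items)
    = [("TYPE", [("TP", tpT), ("FP", fpT), ("FN", fnT)]),
       ("BRAND", [("TP", tpB), ("FP", fpB), ("FN", fnB)]),
       ("VOLUME", [("TP", tpV), ("FP", fpV), ("FN", fnV)]),
       ("PERCENT", [("TP", tpP), ("FP", fpP), ("FN", fnP)])] := by
  have s0 : ((((PySem.Dict.empty.insert "TYPE" (PySem.Dict.ofList [("TP", (0 : Int)), ("FP", 0), ("FN", 0)])).insert "BRAND" (PySem.Dict.ofList [("TP", (0 : Int)), ("FP", 0), ("FN", 0)])).insert "VOLUME" (PySem.Dict.ofList [("TP", (0 : Int)), ("FP", 0), ("FN", 0)])).insert "PERCENT" (PySem.Dict.ofList [("TP", (0 : Int)), ("FP", 0), ("FN", 0)])) = PySem.Dict.mk [("TYPE", PySem.Dict.mk [("TP", (0 : Int)), ("FP", (0 : Int)), ("FN", (0 : Int))]), ("BRAND", PySem.Dict.mk [("TP", (0 : Int)), ("FP", (0 : Int)), ("FN", (0 : Int))]), ("VOLUME", PySem.Dict.mk [("TP", (0 : Int)), ("FP", (0 : Int)), ("FN", (0 :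 Int))]), ("PERCENT", PySem.Dict.mk [("TP", (0 : Int)), ("FP", (0 : Int)), ("FN", (0 : Int))])] := by rfl
  have s1 : (PySem.Dict.mk [("TYPE", PySem.Dict.mk [("TP", (0 : Int)), ("FP", (0 : Int)), ("FN", (0 : Int))]), ("BRAND", PySem.Dict.mk [("TP", (0 : Int)), ("FP", (0 : Int)), ("FN", (0 : Int))]), ("VOLUME", PySem.Dict.mk [("TP", (0 : Int)), ("FP", (0 : Int)), ("FN", (0 : Int))]), ("PERCENT", PySem.Dict.mk [("TP", (0 : Int)), ("FP", (0 : Int)), ("FN", (0 : Int))])]).modify "TYPE" PySem.Dict.empty (fun inner => inner.insert "TP" tpT) = PySem.Dict.mk [("TYPE", PySem.Dict.mk [("TP", tpT), ("FP", (0 : Int)), ("FN", (0 : Int))]), ("BRAND", PySem.Dict.mk [("TP", (0 : Int)), ("FP", (0 : Int)), ("FN", (0 : Int))]), ("VOLUME", PySem.Dict.mk [("TP", (0 : Int)), ("FP", (0 : Int)), ("FN", (0 : Int))]), ("PERCENT", PySem.Dict.mk [("TP", (0 : Int)), ("FP", (0 : Int)), ("FN", (0 : Int))])] := by rfl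
  have s2 : (PySem.Dict.mk [("TYPE", PySem.Dict.mk [("TP", tpT), ("FP", (0 : Int)), ("FN", (0 : Int))]), ("BRAND", PySem.Dict.mk [("TP", (0 : Int)), ("FP", (0 : Int)), ("FN", (0 : Int))]), ("VOLUME", PySem.Dict.mk [("TP", (0 : Int)), ("FP", (0 : Int)), ("FN", (0 : Int))]), ("PERCENT", PySem.Dict.mk [("TP", (0 : Int)), ("FP", (0 : Int)), ("FN", (0 : Int))])]).modify "TYPE" PySem.Dict.empty (fun inner => inner.insert "FP" fpT) = PySem.Dict.mk [("TYPE", PySem.Dict.mk [("TP", tpT), ("FP", fpT), ("FN", (0 : Int))]), ("BRAND", PySem.Dict.mk [("TP", (0 : Int)), ("FP", (0 : Int)), ("FN", (0 : Int))]), ("VOLUME", PySem.Dict.mk [("TP", (0 : Int)), ("FP", (0 : Int)), ("FN", (0 : Int))]), ("PERCENT", PySem.Dict.mk [("TP", (0 : Int)), ("FP", (0 : Int)), ("FN", (0 : Int))])] := by rfl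
  have s3 : (PySem.Dict.mk [("TYPE", PySem.Dict.mk [("TP", tpT), ("FP", fpT), ("FN", (0 : Int))]), ("BRAND", PySem.Dict.mk [("TP", (0 : Int)), ("FP", (0 : Int)), ("FN", (0 : Int))]), ("VOLUME", PySem.Dict.mk [("TP", (0 : Int)), ("FP", (0 : Int)), ("FN", (0 : Int))]), ("PERCENT", PySem.Dict.mk [("TP", (0 : Int)), ("FP", (0 : Int)), ("FN", (0 : Int))])]).modify "TYPE" PySem.Dict.empty (fun inner => inner.insert "FN" fnT) = PySem.Dict.mk [("TYPE", PySem.Dict.mk [("TP", tpT), ("FP", fpT), ("FN", fnT)]), ("BRAND", PySem.Dict.mk [("TP", (0 : Int)), ("FP", (0 : Int)), ("FN", (0 : Int))]), ("VOLUME", PySem.Dict.mk [("TP", (0 : Int)), ("FP", (0 : Int)), ("FN", (0 : Int))]), ("PERCENT", PySem.Dict.mk [("TP", (0 : Int)), ("FP", (0 : Int)), ("FN", (0 : Int))])] := by rfl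
  have s4 : (PySem.Dict.mk [("TYPE", PySem.Dict.mk [("TP", tpT), ("FP", fpT), ("FN", fnT)]), ("BRAND", PySem.Dict.mk [("TP", (0 : Int)), ("FP", (0 : Int)), ("FN", (0 : Int))]), ("VOLUME", PySem.Dict.mk [("TP", (0 : Int)), ("FP", (0 : Int)), ("FN", (0 : Int))]), ("PERCENT", PySem.Dict.mk [("TP", (0 : Int)), ("FP", (0 : Int)), ("FN", (0 : Int))])]).modify "BRAND" PySem.Dict.empty (fun inner => inner.insert "TP" tpB) = PySem.Dict.mk [("TYPE", PySem.Dict.mk [("TP", tpT), ("FP", fpT), ("FN", fnT)]), ("BRAND", PySem.Dict.mk [("TP", tpB), ("FP", (0 : Int)), ("FN", (0 : Int))]), ("VOLUME", PySem.Dict.mk [("TP", (0 : Int)), ("FP", (0 : Int)), ("FN", (0 : Int))]), ("PERCENT", PySem.Dict.mk [("TP", (0 : Int)), ("FP", (0 : Int)), ("FN", (0 : Int))])] := by rfl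
  have s5 : (PySem.Dict.mk [("TYPE", PySem.Dict.mk [("TP", tpT), ("FP", fpT), ("FN", fnT)]), ("BRAND", PySem.Dict.mk [("TP", tpB), ("FP", (0 : Int)), ("FN", (0 : Int))]), ("VOLUME", PySem.Dict.mk [("TP", (0 : Int)), ("FP", (0 : Int)), ("FN", (0 : Int))]), ("PERCENT", PySem.Dict.mk [("TP", (0 : Int)), ("FP", (0 : Int)), ("FN", (0 : Int))])]).modify "BRAND" PySem.Dict.empty (fun inner => inner.insert "FP" fpB) = PySem.Dict.mk [("TYPE", PySem.Dict.mk [("TP", tpT), ("FP", fpT), ("FN", fnT)]), ("BRAND", PySem.Dict.mk [("TP", tpB), ("FP", fpB), ("FN", (0 : Int))]), ("VOLUME", PySem.Dict.mk [("TP", (0 : Int)), ("FP", (0 : Int)), ("FN", (0 : Int))]), ("PERCENT", PySem.Dict.mk [("TP", (0 : Int)), ("FP", (0 : Int)), ("FN", (0 : Int))])] := by rfl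
  have s6 : (PySem.Dict.mk [("TYPE", PySem.Dict.mk [("TP", tpT), ("FP", fpT), ("FN", fnT)]), ("BRAND", PySem.Dict.mk [("TP", tpB), ("FP", fpB), ("FN", (0 : Int))]), ("VOLUME", PySem.Dict.mk [("TP", (0 : Int)), ("FP", (0 : Int)), ("FN", (0 : Int))]), ("PERCENT", PySem.Dict.mk [("TP", (0 : Int)), ("FP", (0 : Int)), ("FN", (0 : Int))])]).modify "BRAND" PySem.Dict.empty (fun inner => inner.insert "FN" fnB) = PySem.Dict.mk [("TYPE", PySem.Dict.mk [("TP", tpT), ("FP", fpT), ("FN", fnT)]), ("BRAND", PySem.Dict.mk [("TP", tpB), ("FP", fpB), ("FN", fnB)]), ("VOLUME", PySem.Dict.mk [("TP", (0 : Int)), ("FP", (0 : Int)), ("FN", (0 : Int))]), ("PERCENT", PySem.Dict.mk [("TP", (0 : Int)), ("FP", (0 : Int)), ("FN", (0 : Int))])] := by rfl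
  have s7 : (PySem.Dict.mk [("TYPE", PySem.Dict.mk [("TP", tpT), ("FP", fpT), ("FN", fnT)]), ("BRAND", PySem.Dict.mk [("TP", tpB), ("FP", fpB), ("FN", fnB)]), ("VOLUME", PySem.Dict.mk [("TP", (0 : Int)), ("FP", (0 : Int)), ("FN", (0 : Int))]), ("PERCENT", PySem.Dict.mk [("TP", (0 : Int)), ("FP", (0 : Int)), ("FN", (0 : Int))])]).modify "VOLUME" PySem.Dict.empty (fun inner => inner.insert "TP" tpV) = PySem.Dict.mk [("TYPE", PySem.Dict.mk [("TP", tpT), ("FP", fpT), ("FN", fnT)]), ("BRAND", PySem.Dict.mk [("TP", tpB), ("FP", fpB), ("FN", fnB)]), ("VOLUME", PySem.Dict.mk [("TP", tpV), ("FP", (0 : Int)), ("FN", (0 : Int))]), ("PERCENT", PySem.Dict.mk [("TP", (0 : Int)), ("FP", (0 : Int)), ("FN", (0 : Int))])] := by rfl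
  have s8 : (PySem.Dict.mk [("TYPE", PySem.Dict.mk [("TP", tpT), ("FP", fpT), ("FN", fnT)]), ("BRAND", PySem.Dict.mk [("TP", tpB), ("FP", fpB), ("FN", fnB)]), ("VOLUME", PySem.Dict.mk [("TP", tpV), ("FP", (0 : Int)), ("FN", (0 : Int))]), ("PERCENT", PySem.Dict.mk [("TP", (0 : Int)), ("FP", (0 : Int)), ("FN", (0 : Int))])]).modify "VOLUME" PySem.Dict.empty (fun inner => inner.insert "FP" fpV) = PySem.Dict.mk [("TYPE", PySem.Dict.mk [("TP", tpT), ("FP", fpT), ("FN", fnT)]), ("BRAND", PySem.Dict.mk [("TP", tpB), ("FP", fpB), ("FN", fnB)]), ("VOLUME", PySem.Dict.mk [("TP", tpV), ("FP", fpV), ("FN", (0 : Int))]), ("PERCENT", PySem.Dict.mk [("TP", (0 : Int)), ("FP", (0 : Int)), ("FN", (0 : Int))])] := by rfl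
  have s9 : (PySem.Dict.mk [("TYPE", PySem.Dict.mk [("TP", tpT), ("FP", fpT), ("FN", fnT)]), ("BRAND", PySem.Dict.mk [("TP", tpB), ("FP", fpB), ("FN", fnB)]), ("VOLUME", PySem.Dict.mk [("TP", tpV), ("FP", fpV), ("FN", (0 : Int))]), ("PERCENT", PySem.Dict.mk [("TP", (0 : Int)), ("FP", (0 : Int)), ("FN", (0 : Int))])]).modify "VOLUME" PySem.Dict.empty (fun inner => inner.insert "FN" fnV) = PySem.Dict.mk [("TYPE", PySem.Dict.mk [("TP", tpT), ("FP", fpT), ("FN", fnT)]), ("BRAND", PySem.Dict.mk [("TP", tpB), ("FP", fpB), ("FN", fnB)]), ("VOLUME", PySem.Dict.mk [("TP", tpV), ("FP", fpV), ("FN", fnV)]), ("PERCENT", PySem.Dict.mk [("TP", (0 : Int)), ("FP", (0 : Int)), ("FN", (0 : Int))])] := by rfl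
  have s10 : (PySem.Dict.mk [("TYPE", PySem.Dict.mk [("TP", tpT), ("FP", fpT), ("FN", fnT)]), ("BRAND", PySem.Dict.mk [("TP", tpB), ("FP", fpB), ("FN", fnB)]), ("VOLUME", PySem.Dict.mk [("TP", tpV), ("FP", fpV), ("FN", fnV)]), ("PERCENT", PySem.Dict.mk [("TP", (0 : Int)), ("FP", (0 : Int)), ("FN", (0 : Int))])]).modify "PERCENT" PySem.Dict.empty (fun inner => inner.insert "TP" tpP) = PySem.Dict.mk [("TYPE", PySem.Dict.mk [("TP", tpT), ("FP", fpT), ("FN", fnT)]), ("BRAND", PySem.Dict.mk [("TP", tpB), ("FP", fpB), ("FN", fnB)]), ("VOLUME", PySem.Dict.mk [("TP", tpV), ("FP", fpV), ("FN", fnV)]), ("PERCENT", PySem.Dict.mk [("TP", tpP), ("FP", (0 : Int)), ("FN", (0 : Int))])] := by rfl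
  have s11 : (PySem.Dict.mk [("TYPE", PySem.Dict.mk [("TP", tpT), ("FP", fpT), ("FN", fnT)]), ("BRAND", PySem.Dict.mk [("TP", tpB), ("FP", fpB), ("FN", fnB)]), ("VOLUME", PySem.Dict.mk [("TP", tpV), ("FP", fpV), ("FN", fnV)]), ("PERCENT", PySem.Dict.mk [("TP", tpP), ("FP", (0 : Int)), ("FN", (0 : Int))])]).modify "PERCENT" PySem.Dict.empty (fun inner => inner.insert "FP" fpP) = PySem.Dict.mk [("TYPE", PySem.Dict.mk [("TP", tpT), ("FP", fpT), ("FN", fnT)]), ("BRAND", PySem.Dict.mk [("TP", tpB), ("FP", fpB), ("FN", fnB)]), ("VOLUME", PySem.Dict.mk [("TP", tpV), ("FP", fpV), ("FN", fnV)]), ("PERCENT", PySem.Dict.mk [("TP", tpP), ("FP", fpP), ("FN", (0 : Int))])] := by rfl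
  have s12 : (PySem.Dict.mk [("TYPE", PySem.Dict.mk [("TP", tpT), ("FP", fpT), ("FN", fnT)]), ("BRAND", PySem.Dict.mk [("TP", tpB), ("FP", fpB), ("FN", fnB)]), ("VOLUME", PySem.Dict.mk [("TP", tpV), ("FP", fpV), ("FN", fnV)]), ("PERCENT", PySem.Dict.mk [("TP", tpP), ("FP", fpP), ("FN", (0 : Int))])]).modify "PERCENT" PySem.Dict.empty (fun inner => inner.insert "FN" fnP) = PySem.Dict.mk [("TYPE", PySem.Dict.mk [("TP", tpT), ("FP", fpT), ("FN", fnT)]), ("BRAND", PySem.Dict.mk [("TP", tpB), ("FP", fpB), ("FN", fnB)]), ("VOLUME", PySem.Dict.mk [("TP", tpV), ("FP", fpV), ("FN", fnV)]), ("PERCENT", PySem.Dict.mk [("TP", tpP), ("FP", fpP), ("FN", fnP)])] := by rfl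
  rw [s0, s1, s2, s3, s4, s5, s6, s7, s8, s9, s10, s11, s12]
  rfl

theorem pv_ports_eq (true_entities pred_entities : List (Int × Int × String)) :
    calculate_ner_metrics true_entities pred_entities = calculate_ner_metrics_alt true_entities pred_entities := by
  have hT := fun ents => pvGroupA_getD ents "TYPE" (by decide)
  have hBr := fun ents => pvGroupA_getD ents "BRAND" (by decide)
  have hV := fun ents => pvGroupA_getD ents "VOLUME" (by decide)
  have hP := fun ents => pvGroupA_getD ents "PERCENT" (by decide)
  unfold calculate_ner_metrics calculate_ner_metrics_alt
  simp only [pvEntityTypes, List.foldl_cons, List.foldl_nil, List.map_cons, List.map_nil,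
    hT, hBr, hV, hP]
  exact pv_assemble _ _ _ _ _ _ _ _ _ _ _ _

-- ===== VERDICT (by name: the statement is the Claim_ definition above) =====
theorem calculate_ner_metrics_spec : Claim_equal_calculate_ner_metrics := by
  intro te pe _
  unfold Spec_calculate_ner_metrics
  exact pv_ports_eq te pe
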